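-- pv_equiv track=rewrite | github.com/kashapovd/sibfu | is-ip/work1/hillpher.py | keyCompletion
-- ===== SOURCE A (Python) =====
-- import string
--
-- alph = (string.digits + string.ascii_letters + string.punctuation + " №®")
--
-- keyPower = 32 #max key length = 2^32 = about 4 billion
--
-- def keyCompletion(key):
--     for i in range(1, keyPower):
--         keyLength = len(key)
--         if keyLength <= i**2:
--             offset = alph.find('a')
--             for j in range(offset, i**2 - keyLength + offset):
--                 key += alph[j]
--             break
--     return key
-- ===== SOURCE B (Python) =====
-- import string
--
-- alph = (string.digits + string.ascii_letters + string.punctuation + " №®")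
--
-- keyPower = 32
--
--
-- def _isqrt(n):
--     # Newton's method integer square root (floor)
--     if n == 0:
--         return 0
--     x = n
--     y = (x + 1) // 2
--     while y < x:
--         x = y
--         y = (x + n // x) // 2
--     return x
--
--
-- def keyCompletion(key):
--     n = len(key)
--     if n > (keyPower - 1) ** 2:
--         return key
--     i = _isqrt(n)
--     if i * i < n:
--         i += 1
--     if i == 0:
--         i = 1
--     off = alph.find('a')
--     return key + alph[off:off + i * i - n]
-- ===== Notes on version B (the rewrite author's own statement) =====
-- stated objective: alternative
-- what changed: A scans i=1..31 for the first square >= len(key) and then appends the pad one character at a time in an inner loop; B computes the ceiling square root directly with a Newton-iteration integer sqrt and appends the whole pad as a single slice of alph.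
import Mathlib
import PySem

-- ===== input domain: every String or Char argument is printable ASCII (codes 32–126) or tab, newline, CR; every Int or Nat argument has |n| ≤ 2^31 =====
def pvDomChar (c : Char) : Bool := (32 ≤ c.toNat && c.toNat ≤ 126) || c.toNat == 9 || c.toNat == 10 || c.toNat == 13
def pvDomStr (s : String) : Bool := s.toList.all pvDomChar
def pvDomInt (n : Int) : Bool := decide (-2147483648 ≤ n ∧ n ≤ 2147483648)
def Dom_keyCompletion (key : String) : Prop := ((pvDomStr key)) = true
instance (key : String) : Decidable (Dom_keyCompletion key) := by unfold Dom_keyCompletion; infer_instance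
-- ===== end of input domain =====

-- B replaces A's linear scan for the smallest square ≥ len(key) and its char-by-char
-- append loop by a Newton-iteration integer square root and a single slice (objective: simpler/alternative).

-- module constant: alph = string.digits + string.ascii_letters + string.punctuation + " №®"
def pvAlph : List Char :=
  ("0123456789abcdefghijklmnopqrstuvwxyzABCDEFGHIJKLMNOPQRSTUVWXYZ!\"#$%&'()*+,-./:;<=>?@[\\]^_`{|}~ №®").toList

-- ===== PORT A =====
-- the outer 'for i in range(1, keyPower)' with its break, on the char list of key;
-- 'key += alph[j]' — alph[j] is always in range here (10 ≤ j < 71 < 97), so the .elim [] branch is never taken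
def pvLoopA (key : List Char) (is : List Int) : List Char :=
  match is with
  | [] => key
  | i :: rest =>
    let keyLength : Int := (key.length : Int)
    if keyLength ≤ i ^ 2 then
      let offset : Int := PySem.Chars.find pvAlph ['a']
      (PySem.List.pyRange offset (i ^ 2 - keyLength + offset) 1).foldl
        (fun k j => k ++ ((PySem.List.pyGet? pvAlph j).elim [] (fun c => [c]))) key
    else pvLoopA key rest

def keyCompletion (key : String) : String :=
  String.ofList (pvLoopA key.toList (PySem.List.pyRange 1 32 1))

-- ===== PORT B =====
-- Newton's-method integer square root, as in Source B's _isqrt (n ≥ 0, so Nat; Python's // on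
-- nonnegative ints is Nat division)
-- the fuel (first argument, = the initial x) only makes the recursion structural: the loop
-- variable x strictly decreases on every iteration, so the fuel is never exhausted
def pvNewton (n : Nat) : Nat → Nat → Nat → Nat
  | 0, x, _ => x
  | fuel + 1, x, y => if y < x then pvNewton n fuel y ((y + n / y) / 2) else x

def pvIsqrt (n : Nat) : Nat :=
  if n = 0 then 0 else pvNewton n n n ((n + 1) / 2)

def keyCompletion_alt (key : String) : String :=
  let n : Nat := key.toList.length
  if 961 < n then key
  else
    let i0 := pvIsqrt n
    let i1 := if i0 * i0 < n then i0 + 1 else i0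
    let i := if i1 = 0 then 1 else i1
    let off : Int := PySem.Chars.find pvAlph ['a']
    String.ofList (key.toList ++ PySem.List.slice pvAlph (some off) (some (off + (i : Int) * (i : Int) - (n : Int))))

-- ===== PRECONDITION & SPEC =====
def Spec_keyCompletion (key : String) (out : String) : Prop := out = keyCompletion_alt key
instance (key : String) (out : String) : Decidable (Spec_keyCompletion key out) := by unfold Spec_keyCompletion; infer_instance

-- ===== CLAIM (what is proved, stated in full; the proofs are below) =====
def Claim_equal_keyCompletion : Prop := ∀ (key : String), Dom_keyCompletion key → Spec_keyCompletion key (keyCompletion key)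

-- ===== LEMMAS AND PROOFS =====

-- the pad A appends, as a function of the key length only
def pvPadA (n : Int) (is : List Int) : List Char :=
  match is with
  | [] => []
  | i :: rest =>
    if n ≤ i ^ 2 then
      let offset : Int := PySem.Chars.find pvAlph ['a']
      (PySem.List.pyRange offset (i ^ 2 - n + offset) 1).flatMap
        (fun j => (PySem.List.pyGet? pvAlph j).elim [] (fun c => [c]))
    else pvPadA n rest

-- the pad B appends, as a function of the key length only
def pvPadB (n : Nat) : List Char :=
  if 961 < n then []
  else
    let i0 := pvIsqrt n
    let i1 := if i0 * i0 < n then i0 + 1 else i0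
    let i := if i1 = 0 then 1 else i1
    let off : Int := PySem.Chars.find pvAlph ['a']
    PySem.List.slice pvAlph (some off) (some (off + (i : Int) * (i : Int) - (n : Int)))

lemma pvLoopA_eq_pad (is : List Int) (key : List Char) :
    pvLoopA key is = key ++ pvPadA (key.length : Int) is := by
  induction is with
  | nil => simp [pvLoopA, pvPadA]
  | cons i rest ih =>
    simp only [pvLoopA, pvPadA]
    split
    · rw [PySem.List.foldl_append_eq_flatMap]
    · exact ih

lemma pvPadA_nil_of_big (n : Int) (is : List Int) (h : ∀ i ∈ is, i ^ 2 < n) :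
    pvPadA n is = [] := by
  induction is with
  | nil => rfl
  | cons i rest ih =>
    have hi := h i (by simp)
    simp only [pvPadA, if_neg (not_le.mpr hi)]
    exact ih (fun j hj => h j (by simp [hj]))

set_option maxRecDepth 100000 in
lemma pvPad_eq_small : ∀ n : Nat, n < 962 → pvPadA (n : Int) (PySem.List.pyRange 1 32 1) = pvPadB n := by
  decide

lemma pvPad_eq (n : Nat) : pvPadA (n : Int) (PySem.List.pyRange 1 32 1) = pvPadB n := by
  by_cases h : n < 962
  · exact pvPad_eq_small n h
  · have hb : (961 : Nat) < n := by omega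
    rw [pvPadB, if_pos hb]
    apply pvPadA_nil_of_big
    intro i hi
    have hmem := (PySem.List.mem_pyRange_one (a := 1) (b := 32) (x := i)).mp hi
    have h1 : 1 ≤ i := hmem.1
    have h2 : i < 32 := hmem.2
    have : i ^ 2 ≤ 961 := by nlinarith
    omega

-- ===== VERDICT (by name: the statement is the Claim_ definition above) =====
theorem keyCompletion_spec : Claim_equal_keyCompletion := by
  intro key _
  show keyCompletion key = keyCompletion_alt key
  rw [keyCompletion, keyCompletion_alt, pvLoopA_eq_pad, pvPad_eq]
  rw [pvPadB]
  split
  · simp [String.ofList_toList]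
  · rfl
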